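-- pv_equiv track=rewrite | github.com/KaloyanH/Python-SoftUni-Exams-and-Exam-Preparations- | SoftUni Advanced/Exam Prep 24 October 2020/list_pureness.py | best_list_pureness
-- ===== SOURCE A (Python) =====
-- def best_list_pureness(*args):
--
--     rotations = args[-1]
--     num_list = args[0]
--
--     max_sum = 0
--     rotation = 0
--
--     for idx in range(rotations + 1):
--
--         current_sum = 0
--         current_rotation = idx
--         for index, value in enumerate(num_list):
--             current_sum += index * value
--
--         if current_sum > max_sum:
--             max_sum = current_sum
--             rotation = current_rotation
--
--         last_element = num_list.pop()
--         num_list.insert(0, last_element)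
--
--
--     return f"Best pureness {max_sum} after {rotation} rotations"
-- ===== SOURCE B (Python) =====
-- # Incremental O(n + rotations) re-implementation: each right-rotation changes the
-- # pureness by total - n*last, so no per-rotation rescan. NOTE: unlike A, B does not
-- # mutate num_list in place (A leaves it rotated rotations+1 times); the return value
-- # is identical.
-- def best_list_pureness(*args):
--     rotations = args[-1]
--     num_list = args[0]
--     n = len(num_list)
--     total = sum(num_list)
--     s = sum(i * v for i, v in enumerate(num_list))
--     max_sum = 0
--     rotation = 0
--     for k in range(rotations + 1):
--         if s > max_sum:
--             max_sum = s
--             rotation = k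
--         s += total - n * num_list[(n - 1 - k) % n]
--     return f"Best pureness {max_sum} after {rotation} rotations"
-- ===== Notes on version B (the rewrite author's own statement) =====
-- stated objective: faster
-- what changed: Instead of rescanning the whole list to recompute the weighted sum for every rotation (and physically rotating the list), B computes the pureness once and updates it per rotation in O(1) via s += total - n*last, indexing the last element of the k-th rotation directly in the original list.
import Mathlib
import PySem

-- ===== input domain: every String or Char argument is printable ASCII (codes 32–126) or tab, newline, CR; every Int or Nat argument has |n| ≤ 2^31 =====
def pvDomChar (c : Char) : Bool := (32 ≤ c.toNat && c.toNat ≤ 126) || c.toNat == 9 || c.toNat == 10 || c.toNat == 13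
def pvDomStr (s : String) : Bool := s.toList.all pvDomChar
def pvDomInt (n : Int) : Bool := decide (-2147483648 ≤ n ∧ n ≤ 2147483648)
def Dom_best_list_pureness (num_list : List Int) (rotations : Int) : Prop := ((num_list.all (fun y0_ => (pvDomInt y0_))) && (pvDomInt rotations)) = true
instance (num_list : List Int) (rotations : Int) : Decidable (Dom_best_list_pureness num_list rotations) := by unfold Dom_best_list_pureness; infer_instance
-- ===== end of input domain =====

-- B replaces A's per-rotation rescan (and physical rotation of the list) by a single
-- O(1) incremental update of the pureness per rotation (faster); equivalence is about
-- the RETURN value only: A mutates num_list in place (rotates it), B does not.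

-- ===== PORT A =====
-- inner loop: for index, value in enumerate(num_list): current_sum += index * value
def pvPureA (l : List Int) : Int :=
  (PySem.List.enumerate l).foldl (fun cs p => cs + p.1 * p.2) 0

-- one iteration of A's outer loop (state: num_list, max_sum, rotation)
def pvStepA (st : List Int × Int × Int) (idx : Int) : List Int × Int × Int :=
  let cs := pvPureA st.1
  let mr := if cs > st.2.1 then (cs, idx) else st.2
  match PySem.List.pop? st.1 (-1) with
  | some (x, rest) => (PySem.List.insert rest 0 x, mr)
  | none => (st.1, mr)   -- Python raises IndexError here; excluded by Pre_

def best_list_pureness (num_list : List Int) (rotations : Int) : String :=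
  let st := (PySem.List.pyRange 0 (rotations + 1) 1).foldl pvStepA (num_list, 0, 0)
  "Best pureness " ++ PySem.Int.toStr st.2.1 ++ " after " ++ PySem.Int.toStr st.2.2 ++ " rotations"

-- ===== PORT B =====
-- one iteration of B's loop (state: s, max_sum, rotation); reads the original list
def pvStepB (num_list : List Int) (n total : Int) (st : Int × Int × Int) (k : Int) : Int × Int × Int :=
  let mr := if st.1 > st.2.1 then (st.1, k) else st.2
  let last := (PySem.List.pyGet? num_list (PySem.Int.mod (n - 1 - k) n)).getD 0  -- none/мod-0 unreachable under Pre_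
  (st.1 + (total - n * last), mr)

def best_list_pureness_alt (num_list : List Int) (rotations : Int) : String :=
  let n : Int := PySem.List.len num_list
  let total : Int := num_list.sum
  let s : Int := ((PySem.List.enumerate num_list).map (fun p => p.1 * p.2)).sum
  let st := (PySem.List.pyRange 0 (rotations + 1) 1).foldl (pvStepB num_list n total) (s, 0, 0)
  "Best pureness " ++ PySem.Int.toStr st.2.1 ++ " after " ++ PySem.Int.toStr st.2.2 ++ " rotations"

-- ===== PRECONDITION & SPEC =====
-- Pre_ excludes only the inputs on which A raises: an empty list with rotations ≥ 0
-- makes num_list.pop() raise IndexError.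
def Pre_best_list_pureness (num_list : List Int) (rotations : Int) : Prop :=
  num_list ≠ [] ∨ rotations + 1 ≤ 0
instance (num_list : List Int) (rotations : Int) : Decidable (Pre_best_list_pureness num_list rotations) := by unfold Pre_best_list_pureness; infer_instance
def pvWitness_best_list_pureness : List Int × Int := ([1, 2, 3], 2)

def Spec_best_list_pureness (num_list : List Int) (rotations : Int) (out : String) : Prop := out = best_list_pureness_alt num_list rotations
instance (num_list : List Int) (rotations : Int) (out : String) : Decidable (Spec_best_list_pureness num_list rotations out) := by unfold Spec_best_list_pureness; infer_instance

-- ===== CLAIM (what is proved, stated in full; the proofs are below) =====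
def Claim_equal_best_list_pureness : Prop := ∀ (num_list : List Int) (rotations : Int), Dom_best_list_pureness num_list rotations → Pre_best_list_pureness num_list rotations → Spec_best_list_pureness num_list rotations (best_list_pureness num_list rotations)

-- ===== LEMMAS AND PROOFS =====

-- S l s = sum of (index+s) * value over l, B's initial weighted sum
def pvS (l : List Int) (s : Int) : Int :=
  ((PySem.List.enumerate l s).map (fun p => p.1 * p.2)).sum

theorem pvS_cons (x : Int) (t : List Int) (s : Int) :
    pvS (x :: t) s = s * x + pvS t (s + 1) := by
  simp [pvS, PySem.List.enumerate_cons]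

theorem pvPureA_eq (l : List Int) : pvPureA l = pvS l 0 := by
  simpa [pvPureA, pvS] using
    PySem.List.foldl_add (l := PySem.List.enumerate l) (g := fun p => p.1 * p.2) (a := 0)

theorem pvS_shift (l : List Int) (s : Int) : pvS l (s + 1) = pvS l s + l.sum := by
  induction l generalizing s with
  | nil => simp [pvS]
  | cons x t ih =>
      rw [pvS_cons, pvS_cons, show s + 1 + 1 = (s+1) + 1 from rfl, ih]
      simp [List.sum_cons]; ring

theorem pvS_append_last (t : List Int) (y : Int) (s : Int) :
    pvS (t ++ [y]) s = pvS t s + (s + t.length) * y := by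
  induction t generalizing s with
  | nil => simp [pvS]
  | cons x u ih =>
      rw [List.cons_append, pvS_cons, pvS_cons, ih]
      push_cast [List.length_cons]; ring

-- right rotation of a nonempty list: pureness changes by sum - n * last
theorem pvS_rot (l : List Int) (h : l ≠ []) :
    pvS (l.getLast h :: l.dropLast) 0 = pvS l 0 + l.sum - l.length * l.getLast h := by
  have hl : l.dropLast ++ [l.getLast h] = l := List.dropLast_append_getLast h
  have h1 : pvS l 0 = pvS l.dropLast 0 + (0 + (l.dropLast.length : Int)) * l.getLast h := by
    conv_lhs => rw [← hl]
    exact pvS_append_last _ _ _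
  have h2 : pvS (l.getLast h :: l.dropLast) 0 = 0 * l.getLast h + pvS l.dropLast (0 + 1) :=
    pvS_cons _ _ _
  have h3 : pvS l.dropLast (0 + 1) = pvS l.dropLast 0 + l.dropLast.sum := pvS_shift _ _
  have h4 : l.dropLast.sum = l.sum - l.getLast h := by
    have : l.sum = l.dropLast.sum + l.getLast h := by
      conv_lhs => rw [← hl]
      simp
    omega
  have h5 : (l.dropLast.length : Int) = (l.length : Int) - 1 := by
    have h6 : l.dropLast.length = l.length - 1 := List.length_dropLast
    have hlen : 0 < l.length := List.length_pos_iff.mpr h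
    omega
  rw [h2, h3, h4, h1, h5]; ring

-- right rotation = left rotation by n-1
theorem pvRotR_eq_rotate (l : List Int) (h : l ≠ []) :
    l.getLast h :: l.dropLast = l.rotate (l.length - 1) := by
  have hlen : 0 < l.length := List.length_pos_iff.mpr h
  rw [List.rotate_eq_drop_append_take (by omega)]
  rw [List.drop_length_sub_one h, List.dropLast_eq_take]
  simp

-- the last element of the k-th right rotation, as B indexes it
theorem pvLast_rot (L : List Int) (hL : L ≠ []) (k : Nat) :
    (L.rotate (k * (L.length - 1))).getLast? =
      PySem.List.pyGet? L (PySem.Int.mod ((L.length : Int) - 1 - k) (L.length : Int)) := by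
  have hn : 0 < L.length := List.length_pos_iff.mpr hL
  have hmlt : ((L.length - 1) + k * (L.length - 1)) % L.length < L.length := Nat.mod_lt _ hn
  have hmod : PySem.Int.mod ((L.length : Int) - 1 - k) (L.length : Int)
      = ((((L.length - 1) + k * (L.length - 1)) % L.length : Nat) : Int) := by
    rw [PySem.Int.mod_eq_emod_of_pos (by exact_mod_cast hn)]
    have hc : ((((L.length - 1) + k * (L.length - 1)) % L.length : Nat) : Int)
        = (((L.length - 1) + k * (L.length - 1) : Nat) : Int) % (L.length : Int) := by
      push_cast; rfl
    have hv : (((L.length - 1) + k * (L.length - 1) : Nat) : Int)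
        = ((L.length : Int) - 1 - k) + k * (L.length : Int) := by
      push_cast [Nat.cast_sub hn]; ring
    rw [hc, hv, Int.add_mul_emod_self_right]
  rw [hmod, PySem.List.pyGet?_natCast]
  have hlen : (L.rotate (k * (L.length - 1))).length = L.length := List.length_rotate _ _
  have hne : L.rotate (k * (L.length - 1)) ≠ [] := by
    intro hcon; rw [hcon] at hlen; simp at hlen; omega
  rw [List.getLast?_eq_getElem?, hlen]
  rw [List.getElem?_eq_getElem (by omega), List.getElem?_eq_getElem (by omega)]
  congr 1
  simp [List.getElem_rotate]

-- the last element of the current rotation, as stepB reads it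
theorem pvLastD (L : List Int) (hL : L ≠ []) (k : Nat)
    (hne : L.rotate (k * (L.length - 1)) ≠ []) :
    (PySem.List.pyGet? L (PySem.Int.mod ((L.length : Int) - 1 - k) (L.length : Int))).getD 0
      = (L.rotate (k * (L.length - 1))).getLast hne := by
  rw [← pvLast_rot L hL k]
  simp [List.getLast?_eq_some_getLast hne]

-- main loop invariant: A's fold over the rotated lists and B's incremental fold
-- produce the same (max_sum, rotation) pair
theorem pvMain (L : List Int) (hL : L ≠ []) (m : Nat) :
    ∀ (k : Nat) (maxS rot : Int),
      (((PySem.List.pyRange (k : Int) ((k : Int) + (m : Int)) 1).foldl pvStepA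
          (L.rotate (k * (L.length - 1)), maxS, rot)).2 : Int × Int)
        = ((PySem.List.pyRange (k : Int) ((k : Int) + (m : Int)) 1).foldl
            (pvStepB L (PySem.List.len L) L.sum)
            (pvS (L.rotate (k * (L.length - 1))) 0, maxS, rot)).2 := by
  induction m with
  | zero =>
      intro k maxS rot
      rw [show ((0 : Nat) : Int) = 0 from rfl, add_zero,
        PySem.List.pyRange_one_eq_nil (le_refl _)]
      rfl
  | succ m ih =>
      intro k maxS rot
      have hn : 0 < L.length := List.length_pos_iff.mpr hL
      have hlen : (L.rotate (k * (L.length - 1))).length = L.length := List.length_rotate _ _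
      have hne : L.rotate (k * (L.length - 1)) ≠ [] := by
        intro hcon; rw [hcon] at hlen; simp at hlen; omega
      have hsum : (L.rotate (k * (L.length - 1))).sum = L.sum := (List.rotate_perm L _).sum_eq
      have hcons : PySem.List.pyRange (k : Int) ((k : Int) + ((m + 1 : Nat) : Int)) 1
          = (k : Int) :: PySem.List.pyRange ((k : Int) + 1) ((k : Int) + ((m + 1 : Nat) : Int)) 1 :=
        PySem.List.pyRange_one_cons (by push_cast; omega)
      have hpop : PySem.List.pop? (L.rotate (k * (L.length - 1))) (-1)
          = some ((L.rotate (k * (L.length - 1))).getLast hne,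
                  (L.rotate (k * (L.length - 1))).dropLast) := by
        conv_lhs => rw [← List.dropLast_append_getLast hne]
        apply PySem.List.pop?_last
      have hrot1 : (L.rotate (k * (L.length - 1))).getLast hne
            :: (L.rotate (k * (L.length - 1))).dropLast
          = L.rotate ((k + 1) * (L.length - 1)) := by
        rw [pvRotR_eq_rotate _ hne, hlen, List.rotate_rotate]
        congr 1
        ring
      have hA : pvStepA (L.rotate (k * (L.length - 1)), maxS, rot) (k : Int)
          = (L.rotate ((k + 1) * (L.length - 1)),
             if pvS (L.rotate (k * (L.length - 1))) 0 > maxS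
               then (pvS (L.rotate (k * (L.length - 1))) 0, (k : Int)) else (maxS, rot)) := by
        simp only [pvStepA, hpop, pvPureA_eq, PySem.List.insert_zero, hrot1]
      have hB : pvStepB L (PySem.List.len L) L.sum
            (pvS (L.rotate (k * (L.length - 1))) 0, maxS, rot) (k : Int)
          = (pvS (L.rotate ((k + 1) * (L.length - 1))) 0,
             if pvS (L.rotate (k * (L.length - 1))) 0 > maxS
               then (pvS (L.rotate (k * (L.length - 1))) 0, (k : Int)) else (maxS, rot)) := by
        simp only [pvStepB, PySem.List.len_eq, pvLastD L hL k hne]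
        rw [← hrot1, pvS_rot _ hne, hsum, hlen]
        congr 1
        ring
      rw [hcons, List.foldl_cons, List.foldl_cons, hA, hB]
      have hkc : ((k : Int) + 1) = (((k + 1 : Nat)) : Int) := by push_cast; ring
      have hbc : ((k : Int) + ((m + 1 : Nat) : Int)) = (((k + 1 : Nat)) : Int) + (m : Int) := by
        push_cast; ring
      rw [hkc, hbc]
      cases hif : (if pvS (L.rotate (k * (L.length - 1))) 0 > maxS
          then (pvS (L.rotate (k * (L.length - 1))) 0, (k : Int)) else (maxS, rot)) with
      | mk mS mR => exact ih (k + 1) mS mR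

-- ===== VERDICT (by name: the statement is the Claim_ definition above) =====
theorem best_list_pureness_spec : Claim_equal_best_list_pureness := by
  intro num_list rotations _ hpre
  unfold Spec_best_list_pureness best_list_pureness best_list_pureness_alt
  by_cases hr : rotations + 1 ≤ 0
  · rw [PySem.List.pyRange_one_eq_nil (by omega)]
    rfl
  · have hne : num_list ≠ [] := by
      cases hpre with
      | inl h => exact h
      | inr h => omega
    obtain ⟨m, hm⟩ : ∃ m : Nat, rotations + 1 = (m : Int) :=
      ⟨(rotations + 1).toNat, by omega⟩
    have hmain := pvMain num_list hne m 0 0 0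
    rw [show ((0 : Nat) : Int) = 0 from rfl, zero_add] at hmain
    simp only [Nat.zero_mul, List.rotate_zero] at hmain
    rw [hm]
    simp only [pvS] at hmain
    simp only [hmain]
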